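-- pv_equiv track=rewrite | github.com/FirasBayazed/advance_invert_dict-function | has_duplicates-missing_letters.py | missing_letters
-- ===== SOURCE A (Python) =====
-- def histogram(s):
--      d = dict()
--      for c in s:
--           if c not in d:
--                d[c] = 1
--           else:
--                d[c] += 1
--      return d
--
-- alphabet = "abcdefghijklmnopqrstuvwxyz"
--
-- def missing_letters(s):
--
--     alpha_list = []
--     for a in alphabet:
--         if a not in histogram(s).keys():
--             alpha_list.append(a)
--     alpha_list.sort()
--     alpha_str =''.join(map(str, alpha_list))
--     return alpha_str
-- ===== SOURCE B (Python) =====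
-- alphabet = "abcdefghijklmnopqrstuvwxyz"
--
-- def missing_letters(s):
--     seen = 0
--     for c in s:
--         o = ord(c) - 97
--         if 0 <= o < 26:
--             seen |= 1 << o
--     return ''.join(chr(97 + i) for i in range(26) if not (seen >> i) & 1)
-- ===== Notes on version B (the rewrite author's own statement) =====
-- stated objective: faster
-- what changed: Replaces A's per-letter loop (which rebuilds the full histogram of s once for each of the 26 letters and then sorts) by a single pass over s accumulating a 26-bit bitmask of seen lowercase letters, then emitting the unset bits in index order (already alphabetical, so no sort).
import Mathlib
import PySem

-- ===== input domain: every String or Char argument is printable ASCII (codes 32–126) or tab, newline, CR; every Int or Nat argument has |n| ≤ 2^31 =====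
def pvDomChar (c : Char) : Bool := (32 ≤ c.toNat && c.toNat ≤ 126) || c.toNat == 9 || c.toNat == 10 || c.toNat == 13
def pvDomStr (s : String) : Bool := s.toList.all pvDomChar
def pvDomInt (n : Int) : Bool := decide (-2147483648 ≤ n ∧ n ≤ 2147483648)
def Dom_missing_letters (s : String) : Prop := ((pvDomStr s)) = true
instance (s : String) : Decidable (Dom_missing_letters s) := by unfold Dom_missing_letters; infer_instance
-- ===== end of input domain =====

-- B replaces A's per-letter loop (rebuilding a histogram each of 26 times, then sorting) by one
-- bitmask pass over s followed by a scan of the 26 bit positions; return value only.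

-- ===== PORT A =====
-- helper 'histogram' from the module, transliterated on List Char
def histogramA (cs : List Char) : PySem.Dict Char Int :=
  cs.foldl (fun d c =>
    if ¬ d.contains c then d.insert c 1
    else d.insert c (d.getD c 0 + 1)) PySem.Dict.empty

def alphabetA : List Char := "abcdefghijklmnopqrstuvwxyz".toList

def missing_letters (s : String) : String :=
  let alpha_list : List Char :=
    alphabetA.foldl (fun acc a =>
      if a ∉ (histogramA s.toList).keys then acc ++ [a] else acc) []
  let sorted_list := PySem.List.sorted alpha_list (fun x => x) false
  String.ofList sorted_list

-- ===== PORT B =====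
-- 'seen |= 1 << o' on the 0..25 bit positions; ord(c)-97 is Int as in Python.
def seenMask (s : String) : Nat :=
  s.toList.foldl (fun seen c =>
    let o : Int := (c.toNat : Int) - 97
    if 0 ≤ o ∧ o < 26 then seen ||| (1 <<< o.toNat) else seen) 0

-- range(26) is ported as List.range 26 (exact: literal nonnegative bound, step 1);
-- 'not (seen >> i) & 1' is 'bit i unset', i.e. ¬ testBit.
def missing_letters_alt (s : String) : String :=
  String.ofList (((List.range 26).filter (fun i => ¬ (seenMask s).testBit i)).map
    (fun i => Char.ofNat (97 + i)))

-- ===== PRECONDITION & SPEC =====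
def Spec_missing_letters (s : String) (out : String) : Prop := out = missing_letters_alt s
instance (s : String) (out : String) : Decidable (Spec_missing_letters s out) := by unfold Spec_missing_letters; infer_instance

-- ===== CLAIM (what is proved, stated in full; the proofs are below) =====
def Claim_equal_missing_letters : Prop := ∀ (s : String), Dom_missing_letters s → Spec_missing_letters s (missing_letters s)

-- ===== LEMMAS AND PROOFS =====

-- keys of the histogram are exactly the characters of the string
theorem mem_keys_histogramA_aux (cs : List Char) (d : PySem.Dict Char Int) (x : Char) :
    x ∈ (cs.foldl (fun d c =>
      if ¬ d.contains c then d.insert c 1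
      else d.insert c (d.getD c 0 + 1)) d).keys ↔ x ∈ cs ∨ x ∈ d.keys := by
  induction cs generalizing d with
  | nil => simp
  | cons c cs ih =>
    rw [List.foldl_cons]
    by_cases h : (PySem.Dict.contains d c : Bool) = true
    · rw [if_neg (by simp [h]), ih]
      simp [PySem.Dict.mem_keys_insert]; tauto
    · rw [if_pos (by simp [h]), ih]
      simp [PySem.Dict.mem_keys_insert]; tauto

theorem mem_keys_histogramA (cs : List Char) (x : Char) :
    x ∈ (histogramA cs).keys ↔ x ∈ cs := by
  rw [histogramA, mem_keys_histogramA_aux]; simp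

-- facts about the 26 code points, checked by computation
theorem toNat_ofNat26 : ∀ i < 26, (Char.ofNat (97 + i)).toNat = 97 + i := by decide

theorem ofNat26_mono : ∀ a < 26, ∀ b < 26, a < b →
    Char.ofNat (97 + a) ≤ Char.ofNat (97 + b) := by decide

-- the bitmask records exactly the lowercase letters occurring in the string
theorem testBit_foldl (cs : List Char) (m : Nat) (i : Nat) (hi : i < 26) :
    ((cs.foldl (fun seen c =>
      let o : Int := (c.toNat : Int) - 97
      if 0 ≤ o ∧ o < 26 then seen ||| (1 <<< o.toNat) else seen) m).testBit i
      ↔ m.testBit i ∨ ∃ c ∈ cs, c.toNat = 97 + i) := by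
  induction cs generalizing m with
  | nil => simp
  | cons c cs ih =>
    rw [List.foldl_cons]
    by_cases h : (0 : Int) ≤ (c.toNat : Int) - 97 ∧ (c.toNat : Int) - 97 < 26
    · rw [show (let o : Int := (c.toNat : Int) - 97
          if 0 ≤ o ∧ o < 26 then m ||| (1 <<< o.toNat) else m)
          = m ||| (1 <<< ((c.toNat : Int) - 97).toNat) from by
            simp only [if_pos h]]
      rw [ih]
      simp only [Nat.testBit_or, Nat.shiftLeft_eq, one_mul, Nat.testBit_two_pow,
        Bool.or_eq_true, decide_eq_true_eq]
      constructor
      · rintro ((hm | hb) | hc)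
        · exact Or.inl hm
        · exact Or.inr ⟨c, by simp, by omega⟩
        · rcases hc with ⟨d, hd, hdn⟩; exact Or.inr ⟨d, by simp [hd], hdn⟩
      · rintro (hm | ⟨d, hd, hdn⟩)
        · exact Or.inl (Or.inl hm)
        · rcases List.mem_cons.mp hd with rfl | hd'
          · exact Or.inl (Or.inr (by omega))
          · exact Or.inr ⟨d, hd', hdn⟩
    · rw [show (let o : Int := (c.toNat : Int) - 97
          if 0 ≤ o ∧ o < 26 then m ||| (1 <<< o.toNat) else m) = m from by
            simp only [if_neg h]]
      rw [ih]
      constructor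
      · rintro (hm | hc)
        · exact Or.inl hm
        · rcases hc with ⟨d, hd, hdn⟩; exact Or.inr ⟨d, by simp [hd], hdn⟩
      · rintro (hm | ⟨d, hd, hdn⟩)
        · exact Or.inl hm
        · rcases List.mem_cons.mp hd with rfl | hd'
          · exact absurd (by omega : (0 : Int) ≤ (d.toNat : Int) - 97 ∧ (d.toNat : Int) - 97 < 26) h
          · exact Or.inr ⟨d, hd', hdn⟩

theorem testBit_seenMask (s : String) (i : Nat) (hi : i < 26) :
    ((seenMask s).testBit i ↔ ∃ c ∈ s.toList, c.toNat = 97 + i) := by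
  rw [seenMask, testBit_foldl _ _ _ hi]; simp

theorem mem_iff_exists_toNat (cs : List Char) (i : Nat) (hi : i < 26) :
    Char.ofNat (97 + i) ∈ cs ↔ ∃ c ∈ cs, c.toNat = 97 + i := by
  constructor
  · intro h
    exact ⟨_, h, toNat_ofNat26 i hi⟩
  · rintro ⟨c, hc, hn⟩
    have h1 : (Char.ofNat (97 + i)).toNat = 97 + i := toNat_ofNat26 i hi
    have h2 : c.toNat = (Char.ofNat (97 + i)).toNat := by omega
    have hce : c = Char.ofNat (97 + i) := Char.ext (UInt32.toNat_inj.mp h2)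
    exact hce ▸ hc

-- alphabet = chr(97+i) for i in range(26)
theorem alphabetA_eq : alphabetA = (List.range 26).map (fun i => Char.ofNat (97 + i)) := by
  decide

-- A's loop builds exactly B's filtered list
theorem lists_eq (s : String) :
    alphabetA.foldl (fun acc a =>
      if a ∉ (histogramA s.toList).keys then acc ++ [a] else acc) [] =
    ((List.range 26).filter (fun i => ¬ (seenMask s).testBit i)).map
      (fun i => Char.ofNat (97 + i)) := by
  rw [PySem.List.foldl_append_ite_eq_filter, List.nil_append, alphabetA_eq,
    List.filter_map]
  congr 1
  apply List.filter_congr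
  intro i hi
  have hi26 : i < 26 := List.mem_range.mp hi
  simp only [Function.comp_apply, decide_eq_decide]
  rw [mem_keys_histogramA, mem_iff_exists_toNat _ _ hi26, testBit_seenMask s i hi26]

-- A's alpha_list is already in increasing order, so Python's sort leaves it unchanged
theorem sorted_lists (s : String) :
    PySem.List.sorted (((List.range 26).filter (fun i => ¬ (seenMask s).testBit i)).map
      (fun i => Char.ofNat (97 + i))) (fun x => x) false =
    ((List.range 26).filter (fun i => ¬ (seenMask s).testBit i)).map
      (fun i => Char.ofNat (97 + i)) := by
  apply PySem.List.sorted_eq_self_of_pairwise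
  rw [List.pairwise_map]
  have hp : ((List.range 26).filter (fun i => ¬ (seenMask s).testBit i)).Pairwise (· < ·) :=
    List.Pairwise.sublist List.filter_sublist List.pairwise_lt_range
  refine hp.imp_of_mem ?_
  intro a b ha hb hab
  have ha26 : a < 26 := List.mem_range.mp (List.mem_of_mem_filter ha)
  have hb26 : b < 26 := List.mem_range.mp (List.mem_of_mem_filter hb)
  exact ofNat26_mono a ha26 b hb26 hab

-- ===== VERDICT (by name: the statement is the Claim_ definition above) =====
theorem missing_letters_spec : Claim_equal_missing_letters := by
  intro s _
  show _ = _
  simp only [missing_letters, missing_letters_alt, lists_eq, sorted_lists]
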